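-- pv_equiv track=rewrite | github.com/alphaonedev/ai-memory-a2a-v0.6.3.1 | scripts/phase5_commit.py | derive_substrate_verdict
-- ===== SOURCE A (Python) =====
-- def derive_substrate_verdict(scenarios: dict[str, str], expected_red: list[str]) -> str:
--     """Per governance §4 verdict rules: PARTIAL if S23/S24 RED + everything else GREEN."""
--     if not scenarios:
--         return "PENDING"
--     expected_set = set(expected_red)
--     statuses = list(scenarios.items())
--     non_expected_red = [s for s, v in statuses if s not in expected_set and v in ("RED", "FAIL")]
--     if non_expected_red:
--         return "FAIL"
--     expected_actual_red = [s for s in expected_set if scenarios.get(s) in ("RED", "FAIL", "EXPECTED_RED")]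
--     expected_actual_green = [s for s in expected_set if scenarios.get(s) in ("GREEN", "PASS")]
--     pending = [s for s, v in statuses if v in ("PENDING", "UNKNOWN", "PENDING_EXPECTED_RED")]
--     if expected_actual_green:
--         return "HARNESS_INTEGRITY_FAILURE"
--     if pending:
--         return "PENDING"
--     if len(expected_actual_red) == len(expected_set):
--         return "PARTIAL — pending Patch 2"
--     return "FAIL"
-- ===== SOURCE B (Python) =====
-- def derive_substrate_verdict(scenarios: dict[str, str], expected_red: list[str]) -> str:
--     """Severity-lattice formulation: each scenario maps to a numeric severity,
--     the overall verdict is read off the maximum severity; only the severity-0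
--     case still needs the all-expected-red completeness test."""
--     if not scenarios:
--         return "PENDING"
--     expected = set(expected_red)
--
--     def severity(name: str, status: str) -> int:
--         if status in ("PENDING", "UNKNOWN", "PENDING_EXPECTED_RED"):
--             return 1
--         if name in expected:
--             return 2 if status in ("GREEN", "PASS") else 0
--         return 3 if status in ("RED", "FAIL") else 0
--
--     worst = max(severity(n, s) for n, s in scenarios.items())
--     if worst == 3:
--         return "FAIL"
--     if worst == 2:
--         return "HARNESS_INTEGRITY_FAILURE"
--     if worst == 1:
--         return "PENDING"
--     if all(scenarios.get(s) in ("RED", "FAIL", "EXPECTED_RED") for s in expected):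
--         return "PARTIAL — pending Patch 2"
--     return "FAIL"
-- ===== Notes on version B (the rewrite author's own statement) =====
-- stated objective: alternative
-- what changed: Recast A's early-return chain over four separately built comprehension lists as a severity lattice: each scenario item is mapped to a numeric severity (3 outsider-red, 2 expected-green, 1 pending, 0 otherwise), the verdict is read off the maximum severity in one reduce, and only the severity-0 case still runs the all-expected-red completeness test.
import Mathlib
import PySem

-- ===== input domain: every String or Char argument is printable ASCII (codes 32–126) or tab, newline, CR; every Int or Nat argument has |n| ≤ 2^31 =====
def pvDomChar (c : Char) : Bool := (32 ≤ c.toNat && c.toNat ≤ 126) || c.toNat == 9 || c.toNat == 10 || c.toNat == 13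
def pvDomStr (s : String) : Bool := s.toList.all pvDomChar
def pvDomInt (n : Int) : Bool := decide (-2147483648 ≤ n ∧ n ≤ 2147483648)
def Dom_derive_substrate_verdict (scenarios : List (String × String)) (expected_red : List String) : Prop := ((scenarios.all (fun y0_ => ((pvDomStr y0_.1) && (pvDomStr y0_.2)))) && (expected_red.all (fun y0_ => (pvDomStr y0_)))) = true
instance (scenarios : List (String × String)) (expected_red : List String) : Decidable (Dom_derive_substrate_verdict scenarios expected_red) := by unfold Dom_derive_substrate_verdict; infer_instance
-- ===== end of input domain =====

-- B replaces A's four list comprehensions and early-return chain by a severity lattice: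
-- each scenario maps to a numeric severity (3 outsider-red, 2 expected-green, 1 pending),
-- the verdict is read off the maximum severity (simpler arithmetical decomposition).
-- Pre_ excludes scenario lists with duplicate keys, which never arise from a Python dict.


-- ===== PORT A =====
def derive_substrate_verdict (scenarios : List (String × String)) (expected_red : List String) : String :=
  if scenarios.isEmpty then "PENDING" else
  let expected_set : PySem.Set String := PySem.Set.ofList expected_red
  let statuses := scenarios
  let non_expected_red :=
    (statuses.filter (fun p =>
      !(PySem.Set.contains expected_set p.1) && (p.2 == "RED" || p.2 == "FAIL"))).map Prod.fst
  if !non_expected_red.isEmpty then "FAIL" else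
  let expected_actual_red := expected_set.filter (fun s =>
    let v := (PySem.Dict.mk scenarios).get? s
    v == some "RED" || v == some "FAIL" || v == some "EXPECTED_RED")
  let expected_actual_green := expected_set.filter (fun s =>
    let v := (PySem.Dict.mk scenarios).get? s
    v == some "GREEN" || v == some "PASS")
  let pending :=
    (statuses.filter (fun p =>
      p.2 == "PENDING" || p.2 == "UNKNOWN" || p.2 == "PENDING_EXPECTED_RED")).map Prod.fst
  if !expected_actual_green.isEmpty then "HARNESS_INTEGRITY_FAILURE" else
  if !pending.isEmpty then "PENDING" else
  if expected_actual_red.length = expected_set.length then "PARTIAL — pending Patch 2" else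
  "FAIL"

-- ===== PORT B =====
-- severity(name, status) from Source B
def pvSeverity (E : PySem.Set String) (name status : String) : Nat :=
  if status == "PENDING" || status == "UNKNOWN" || status == "PENDING_EXPECTED_RED" then 1
  else if PySem.Set.contains E name then
    (if status == "GREEN" || status == "PASS" then 2 else 0)
  else if status == "RED" || status == "FAIL" then 3 else 0

def derive_substrate_verdict_alt (scenarios : List (String × String)) (expected_red : List String) : String :=
  if scenarios.isEmpty then "PENDING" else
  let E : PySem.Set String := PySem.Set.ofList expected_red
  -- worst = max(severity(n, s) for n, s in scenarios.items()); .getD 0 is unreachable (scenarios ≠ [] here)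
  let worst := (PySem.List.max? (scenarios.map (fun p => pvSeverity E p.1 p.2)) (fun x => x)).getD 0
  if worst == 3 then "FAIL" else
  if worst == 2 then "HARNESS_INTEGRITY_FAILURE" else
  if worst == 1 then "PENDING" else
  if E.all (fun s =>
      (PySem.Dict.mk scenarios).get? s == some "RED" ||
      (PySem.Dict.mk scenarios).get? s == some "FAIL" ||
      (PySem.Dict.mk scenarios).get? s == some "EXPECTED_RED") then "PARTIAL — pending Patch 2" else
  "FAIL"

-- ===== PRECONDITION & SPEC =====
-- Pre_ excludes scenario lists with duplicate keys: they never arise from a Python dict, and on them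
-- A's first-match get-based green test vs B's per-item pass can disagree accidentally.
def Pre_derive_substrate_verdict (scenarios : List (String × String)) (expected_red : List String) : Prop :=
  (scenarios.map Prod.fst).Nodup

instance (scenarios : List (String × String)) (expected_red : List String) : Decidable (Pre_derive_substrate_verdict scenarios expected_red) := by unfold Pre_derive_substrate_verdict; infer_instance

def pvWitness_derive_substrate_verdict : (List (String × String)) × List String :=
  ([("S23", "RED"), ("S1", "GREEN")], ["S23"])

def Spec_derive_substrate_verdict (scenarios : List (String × String)) (expected_red : List String) (out : String) : Prop := out = derive_substrate_verdict_alt scenarios expected_red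
instance (scenarios : List (String × String)) (expected_red : List String) (out : String) : Decidable (Spec_derive_substrate_verdict scenarios expected_red out) := by unfold Spec_derive_substrate_verdict; infer_instance

-- ===== CLAIM (what is proved, stated in full; the proofs are below) =====
def Claim_equal_derive_substrate_verdict : Prop := ∀ (scenarios : List (String × String)) (expected_red : List String), Dom_derive_substrate_verdict scenarios expected_red → Pre_derive_substrate_verdict scenarios expected_red → Spec_derive_substrate_verdict scenarios expected_red (derive_substrate_verdict scenarios expected_red)

-- ===== LEMMAS AND PROOFS =====

theorem le_foldl_max_iff (t : List Nat) (a k : Nat) :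
    k ≤ t.foldl max a ↔ k ≤ a ∨ ∃ x ∈ t, k ≤ x := by
  induction t generalizing a with
  | nil => simp
  | cons x t ih =>
    rw [List.foldl_cons, ih]
    constructor
    · rintro (h | h)
      · rcases le_max_iff.mp h with h | h
        · exact Or.inl h
        · exact Or.inr ⟨x, by simp, h⟩
      · obtain ⟨y, hy, hky⟩ := h
        exact Or.inr ⟨y, by simp [hy], hky⟩
    · rintro (h | ⟨y, hy, hky⟩)
      · exact Or.inl (le_max_iff.mpr (Or.inl h))
      · rcases List.mem_cons.mp hy with rfl | hy
        · exact Or.inl (le_max_iff.mpr (Or.inr hky))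
        · exact Or.inr ⟨y, hy, hky⟩

theorem foldl_max_le (t : List Nat) (a b : Nat) (ht : ∀ x ∈ t, x ≤ b) (ha : a ≤ b) :
    t.foldl max a ≤ b := by
  induction t generalizing a with
  | nil => simpa
  | cons x t ih =>
    rw [List.foldl_cons]
    exact ih (max a x) (fun y hy => ht y (by simp [hy])) (max_le ha (ht x (by simp)))

theorem pend_not_red (s : String)
    (h : (s == "PENDING" || s == "UNKNOWN" || s == "PENDING_EXPECTED_RED") = true) :
    (s == "RED" || s == "FAIL") = false := by
  rcases (by simpa using h : (s = "PENDING" ∨ s = "UNKNOWN") ∨ s = "PENDING_EXPECTED_RED") with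
    (rfl | rfl) | rfl <;> decide

theorem pend_not_green (s : String)
    (h : (s == "PENDING" || s == "UNKNOWN" || s == "PENDING_EXPECTED_RED") = true) :
    (s == "GREEN" || s == "PASS") = false := by
  rcases (by simpa using h : (s = "PENDING" ∨ s = "UNKNOWN") ∨ s = "PENDING_EXPECTED_RED") with
    (rfl | rfl) | rfl <;> decide

theorem sev_le (E : PySem.Set String) (n s : String) : pvSeverity E n s ≤ 3 := by
  unfold pvSeverity; split_ifs <;> omega

theorem sev3_iff (E : PySem.Set String) (n s : String) :
    3 ≤ pvSeverity E n s ↔ (!(PySem.Set.contains E n) && (s == "RED" || s == "FAIL")) = true := by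
  unfold pvSeverity
  split_ifs with h1 h2 h3 h4
  · refine iff_of_false (by omega) ?_
    rw [pend_not_red s h1]; simp
  · refine iff_of_false (by omega) ?_
    rw [h2]; simp
  · refine iff_of_false (by omega) ?_
    rw [h2]; simp
  · refine iff_of_true (by omega) ?_
    rw [Bool.eq_false_iff.mpr h2, h4]; rfl
  · refine iff_of_false (by omega) ?_
    rw [Bool.eq_false_iff.mpr h4]; simp

theorem sev2_iff (E : PySem.Set String) (n s : String) :
    2 ≤ pvSeverity E n s ↔
      ((!(PySem.Set.contains E n) && (s == "RED" || s == "FAIL")) = true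
        ∨ (PySem.Set.contains E n && (s == "GREEN" || s == "PASS")) = true) := by
  unfold pvSeverity
  split_ifs with h1 h2 h3 h4
  · refine iff_of_false (by omega) ?_
    rw [pend_not_red s h1, pend_not_green s h1]; simp
  · exact iff_of_true (by omega) (Or.inr (by rw [h2, h3]; rfl))
  · refine iff_of_false (by omega) ?_
    rintro (hA | hB)
    · rw [h2] at hA; simp at hA
    · rw [Bool.eq_false_iff.mpr h3] at hB; simp at hB
  · exact iff_of_true (by omega) (Or.inl (by rw [Bool.eq_false_iff.mpr h2, h4]; rfl))
  · refine iff_of_false (by omega) ?_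
    rintro (hA | hB)
    · rw [Bool.eq_false_iff.mpr h4] at hA; simp at hA
    · rw [Bool.eq_false_iff.mpr h2] at hB; simp at hB

theorem sev1_iff (E : PySem.Set String) (n s : String) :
    1 ≤ pvSeverity E n s ↔
      ((!(PySem.Set.contains E n) && (s == "RED" || s == "FAIL")) = true
        ∨ (PySem.Set.contains E n && (s == "GREEN" || s == "PASS")) = true
        ∨ (s == "PENDING" || s == "UNKNOWN" || s == "PENDING_EXPECTED_RED") = true) := by
  unfold pvSeverity
  split_ifs with h1 h2 h3 h4
  · exact iff_of_true (by omega) (Or.inr (Or.inr h1))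
  · exact iff_of_true (by omega) (Or.inr (Or.inl (by rw [h2, h3]; rfl)))
  · refine iff_of_false (by omega) ?_
    rintro (hA | hB | hP)
    · rw [h2] at hA; simp at hA
    · rw [Bool.eq_false_iff.mpr h3] at hB; simp at hB
    · exact h1 hP
  · exact iff_of_true (by omega) (Or.inl (by rw [Bool.eq_false_iff.mpr h2, h4]; rfl))
  · refine iff_of_false (by omega) ?_
    rintro (hA | hB | hP)
    · rw [Bool.eq_false_iff.mpr h4] at hA; simp at hA
    · rw [Bool.eq_false_iff.mpr h2] at hB; simp at hB
    · exact h1 hP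

-- membership in the assoc list ↔ Dict.get?, for nodup keys
theorem get?_mk_eq_some_iff (scenarios : List (String × String))
    (hpre : (scenarios.map Prod.fst).Nodup) (s v : String) :
    (PySem.Dict.mk scenarios).get? s = some v ↔ (s, v) ∈ scenarios := by
  have h := PySem.Dict.get?_eq_some_iff_mem_items (d := PySem.Dict.mk scenarios) (k := s) (v := v)
  simp [PySem.Dict.keys] at h
  exact h hpre

theorem cond_filter_map_isEmpty (l : List (String × String)) (q : String × String → Bool) :
    (!((l.filter q).map Prod.fst).isEmpty) = l.any q := by
  cases hq : l.any q
  · simp only [List.any_eq_false] at hq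
    simp
    exact fun a b h => by simpa using hq (a, b) h
  · simp only [List.any_eq_true] at hq
    obtain ⟨p, hp, hqp⟩ := hq
    have hm : p.1 ∈ (l.filter q).map Prod.fst :=
      List.mem_map_of_mem (List.mem_filter.mpr ⟨hp, hqp⟩)
    simp
    exact ⟨p.1, p.2, by simpa using hp, by simpa using hqp⟩

theorem filter_length_eq_iff {α : Type} (l : List α) (q : α → Bool) :
    (l.filter q).length = l.length ↔ ∀ a ∈ l, q a := by
  constructor
  · intro h
    exact List.filter_eq_self.mp ((List.filter_sublist (l := l) (p := q)).eq_of_length h)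
  · intro h; rw [List.filter_eq_self.mpr h]

-- A's get-based green test over expected_set ↔ an items pass (needs nodup keys)
theorem green_any (scenarios : List (String × String)) (expected_red : List String)
    (hpre : (scenarios.map Prod.fst).Nodup) :
    (!(List.filter
          (fun s =>
            (PySem.Dict.mk scenarios).get? s == some "GREEN" ||
              (PySem.Dict.mk scenarios).get? s == some "PASS")
          (PySem.Set.ofList expected_red)).isEmpty)
      = (scenarios.any fun p =>
          (PySem.Set.ofList expected_red).contains p.1 && (p.2 == "GREEN" || p.2 == "PASS")) := by
  have hbridge := get?_mk_eq_some_iff scenarios hpre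
  rw [Bool.eq_iff_iff]
  constructor
  · intro h
    rw [Bool.not_eq_true', List.isEmpty_eq_false_iff] at h
    obtain ⟨s, hs⟩ := List.exists_mem_of_ne_nil _ h
    obtain ⟨hsE, hsq⟩ := List.mem_filter.mp hs
    rw [List.any_eq_true]
    have hsq' : (PySem.Dict.mk scenarios).get? s = some "GREEN" ∨
        (PySem.Dict.mk scenarios).get? s = some "PASS" := by simpa using hsq
    rcases hsq' with hv | hv
    · exact ⟨(s, "GREEN"), (hbridge s "GREEN").mp hv, by simpa using hsE⟩
    · exact ⟨(s, "PASS"), (hbridge s "PASS").mp hv, by simpa using hsE⟩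
  · intro h
    obtain ⟨p, hp, hq⟩ := List.any_eq_true.mp h
    obtain ⟨hc, hgp⟩ : (PySem.Set.ofList expected_red).contains p.1 = true ∧
        (p.2 = "GREEN" ∨ p.2 = "PASS") := by simpa using hq
    have hE : p.1 ∈ PySem.Set.ofList expected_red := by simpa using hc
    have hget : (PySem.Dict.mk scenarios).get? p.1 = some p.2 := (hbridge p.1 p.2).mpr hp
    have hmf : p.1 ∈ List.filter
        (fun s =>
          (PySem.Dict.mk scenarios).get? s == some "GREEN" ||
            (PySem.Dict.mk scenarios).get? s == some "PASS")
        (PySem.Set.ofList expected_red) :=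
      List.mem_filter.mpr ⟨hE, by
        rcases hgp with hv | hv <;> rw [hv] at hget <;> simp [hget]⟩
    rw [Bool.not_eq_true', List.isEmpty_eq_false_iff]
    exact List.ne_nil_of_mem hmf

theorem AB_eq (scenarios : List (String × String)) (expected_red : List String)
    (hpre : (scenarios.map Prod.fst).Nodup) :
    derive_substrate_verdict scenarios expected_red
      = derive_substrate_verdict_alt scenarios expected_red := by
  by_cases he : scenarios.isEmpty
  · unfold derive_substrate_verdict derive_substrate_verdict_alt
    simp [he]
  · obtain ⟨p, t, rfl⟩ : ∃ p t, scenarios = p :: t := by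
      cases scenarios with
      | nil => simp at he
      | cons p t => exact ⟨p, t, rfl⟩
    have hg := green_any (p :: t) expected_red hpre
    unfold derive_substrate_verdict derive_substrate_verdict_alt
    rw [if_neg he, if_neg he]
    simp only [cond_filter_map_isEmpty, hg, List.map_cons, PySem.List.max?_id_cons,
      Option.getD_some]
    generalize hWdef :
      List.foldl max (pvSeverity (PySem.Set.ofList expected_red) p.1 p.2)
        (List.map (fun q => pvSeverity (PySem.Set.ofList expected_red) q.1 q.2) t) = W
    have hWle : W ≤ 3 := by
      rw [← hWdef]
      refine foldl_max_le _ _ _ ?_ (sev_le _ p.1 p.2)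
      intro x hx
      obtain ⟨q, _, rfl⟩ := List.mem_map.mp hx
      exact sev_le _ q.1 q.2
    have hWk : ∀ k, k ≤ W ↔
        ∃ q ∈ p :: t, k ≤ pvSeverity (PySem.Set.ofList expected_red) q.1 q.2 := by
      intro k
      rw [← hWdef, le_foldl_max_iff]
      constructor
      · rintro (h | ⟨x, hx, hkx⟩)
        · exact ⟨p, by simp, h⟩
        · obtain ⟨q, hq, rfl⟩ := List.mem_map.mp hx
          exact ⟨q, by simp [hq], hkx⟩
      · rintro ⟨q, hq, hkq⟩
        rcases List.mem_cons.mp hq with rfl | hq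
        · exact Or.inl hkq
        · exact Or.inr ⟨_, List.mem_map_of_mem hq, hkq⟩
    cases h3 : (p :: t).any (fun q =>
        !(PySem.Set.contains (PySem.Set.ofList expected_red) q.1) &&
          (q.2 == "RED" || q.2 == "FAIL"))
    · cases h2 : (p :: t).any (fun q =>
          PySem.Set.contains (PySem.Set.ofList expected_red) q.1 &&
            (q.2 == "GREEN" || q.2 == "PASS"))
      · cases h1 : (p :: t).any (fun q =>
            q.2 == "PENDING" || q.2 == "UNKNOWN" || q.2 == "PENDING_EXPECTED_RED")
        · -- no category fires: W = 0, both sides fall to the completeness test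
          have hW0 : ¬ 1 ≤ W := by
            rw [hWk]
            rintro ⟨q, hq, hkq⟩
            rcases (sev1_iff _ q.1 q.2).mp hkq with h | h | h
            · exact List.any_eq_false.mp h3 q hq h
            · exact List.any_eq_false.mp h2 q hq h
            · exact List.any_eq_false.mp h1 q hq h
          have hW : W = 0 := by omega
          rw [hW]
          by_cases hall : ∀ s ∈ PySem.Set.ofList expected_red,
              ((PySem.Dict.mk (p :: t)).get? s == some "RED" ||
                (PySem.Dict.mk (p :: t)).get? s == some "FAIL" ||
                (PySem.Dict.mk (p :: t)).get? s == some "EXPECTED_RED") = true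
          · rw [if_pos ((filter_length_eq_iff _ _).mpr hall),
              if_pos (List.all_eq_true.mpr hall)]
            simp
          · rw [if_neg (fun hlen => hall ((filter_length_eq_iff _ _).mp hlen)),
              if_neg (fun hB => hall (List.all_eq_true.mp hB))]
            simp
        · -- pending: W = 1
          obtain ⟨q, hq, hqc⟩ := List.any_eq_true.mp h1
          have hqc' : (q.2 == "PENDING" || q.2 == "UNKNOWN" ||
              q.2 == "PENDING_EXPECTED_RED") = true := hqc
          have h1le : 1 ≤ W := (hWk 1).mpr
            ⟨q, hq, (sev1_iff _ q.1 q.2).mpr (Or.inr (Or.inr hqc'))⟩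
          have h2le : ¬ 2 ≤ W := by
            rw [hWk]
            rintro ⟨r, hr, hkr⟩
            rcases (sev2_iff _ r.1 r.2).mp hkr with h | h
            · exact List.any_eq_false.mp h3 r hr h
            · exact List.any_eq_false.mp h2 r hr h
          have hW : W = 1 := by omega
          rw [hW]
          simp
      · -- expected green: W = 2
        obtain ⟨q, hq, hqc⟩ := List.any_eq_true.mp h2
        have hqc' : (PySem.Set.contains (PySem.Set.ofList expected_red) q.1 &&
            (q.2 == "GREEN" || q.2 == "PASS")) = true := hqc
        have h2le : 2 ≤ W := (hWk 2).mpr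
          ⟨q, hq, (sev2_iff _ q.1 q.2).mpr (Or.inr hqc')⟩
        have h3le : ¬ 3 ≤ W := by
          rw [hWk]
          rintro ⟨r, hr, hkr⟩
          have h := (sev3_iff _ r.1 r.2).mp hkr
          exact List.any_eq_false.mp h3 r hr h
        have hW : W = 2 := by omega
        rw [hW]
        simp
    · -- outsider red: W = 3
      obtain ⟨q, hq, hqc⟩ := List.any_eq_true.mp h3
      have hqc' : (!(PySem.Set.contains (PySem.Set.ofList expected_red) q.1) &&
          (q.2 == "RED" || q.2 == "FAIL")) = true := hqc
      have h3le : 3 ≤ W := (hWk 3).mpr ⟨q, hq, (sev3_iff _ q.1 q.2).mpr hqc'⟩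
      have hW : W = 3 := by omega
      rw [hW]
      simp

-- ===== VERDICT (by name: the statement is the Claim_ definition above) =====
theorem derive_substrate_verdict_spec : Claim_equal_derive_substrate_verdict := by
  intro scenarios expected_red _ hpre
  exact AB_eq scenarios expected_red hpre
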